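-- pv_equiv track=rewrite | github.com/yuuforest/Personal-Project | PCCP 모의고사/유전법칙.py | spread
-- ===== SOURCE A (Python) =====
-- def spread(generation, order):
--     stack = []
--
--     order -= 1
--     while generation > 1:
--         generation -= 1
--         stack.append(order % 4)
--         order //= 4
--
--     while stack:
--         number = stack.pop()
--         if number == 0:
--             return "RR"
--         if number == 3:
--             return "rr"
--     return "Rr"
-- ===== SOURCE B (Python) =====
-- def spread(generation, order):
--     # The trait is determined by the base-4 digits of order-1, read from the
--     # most significant of its generation-1 digits downward: the first digit
--     # that is 0 gives "RR", the first that is 3 gives "rr", otherwise "Rr".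
--     n = generation - 1
--     o = order - 1
--     length = 0
--     t = o
--     while t > 0:
--         length += 1
--         t //= 4
--     if n > length:
--         return "RR"
--     for k in range(n - 1, -1, -1):
--         d = o // 4 ** k % 4
--         if d == 0:
--             return "RR"
--         if d == 3:
--             return "rr"
--     return "Rr"
-- ===== Notes on version B (the rewrite author's own statement) =====
-- stated objective: faster
-- what changed: A loops generation-1 times pushing base-4 digits of order-1 onto a stack and then pops them; B computes the base-4 digit count of order-1 once, returns RR immediately when generation-1 exceeds it (the leading digits are all 0), and otherwise reads at most that many digits top-down by direct division by powers of 4; Pre_ excludes order <= 0, outside the puzzle's 1-indexed domain, where A's floor-division digits of a negative number are an accident of the implementation.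
-- outside the precondition, e.g. on spread(3, 0): A returns 'rr', B returns 'RR'
import Mathlib
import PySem

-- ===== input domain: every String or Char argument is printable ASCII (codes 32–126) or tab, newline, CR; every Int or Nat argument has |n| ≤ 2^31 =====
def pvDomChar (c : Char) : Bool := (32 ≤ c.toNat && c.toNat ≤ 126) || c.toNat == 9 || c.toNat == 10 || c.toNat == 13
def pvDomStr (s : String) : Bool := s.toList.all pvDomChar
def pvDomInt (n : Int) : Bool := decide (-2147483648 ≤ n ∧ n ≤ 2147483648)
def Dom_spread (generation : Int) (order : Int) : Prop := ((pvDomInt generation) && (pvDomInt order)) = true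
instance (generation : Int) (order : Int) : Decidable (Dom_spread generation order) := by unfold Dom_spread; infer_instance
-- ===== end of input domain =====

-- B replaces A's O(generation) stack-building loop by one base-4 digit count of order-1
-- plus a top-down digit scan; on order <= 0 (outside the puzzle's 1-indexed domain,
-- excluded by Pre_) the two differ.


-- ===== PORT A =====
-- first while loop: push base-4 digits of order (least significant first)
def spreadLoop1 (generation : Int) (order : Int) (stack : List Int) : List Int :=
  if generation > 1 then
    spreadLoop1 (generation - 1) (PySem.Int.floordiv order 4)
      (stack ++ [PySem.Int.mod order 4])
  else stack
termination_by generation.toNat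
decreasing_by omega

-- second while loop: pop from the stack until a 0 or 3 digit is found
def spreadLoop2 (stack : List Int) : String :=
  match h : stack.getLast? with
  | none => "Rr"
  | some number =>
    if number = 0 then "RR"
    else if number = 3 then "rr"
    else spreadLoop2 stack.dropLast
termination_by stack.length
decreasing_by
  have hne : stack ≠ [] := by intro hs; simp [hs] at h
  have := List.length_pos_of_ne_nil hne
  simp [List.length_dropLast]; omega

def spread (generation : Int) (order : Int) : String :=
  spreadLoop2 (spreadLoop1 generation (order - 1) [])

-- ===== PORT B =====
-- `while t > 0: length += 1; t //= 4`
def lenPos (t : Int) : Nat :=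
  if t > 0 then lenPos (PySem.Int.floordiv t 4) + 1 else 0
termination_by t.toNat
decreasing_by
  have h1 := PySem.Int.floordiv_mul_add_mod t 4
  have h2 := PySem.Int.mod_nonneg t (b := 4) (by omega)
  have h3 := PySem.Int.mod_lt t (b := 4) (by omega)
  omega

-- `for k in range(n-1, -1, -1)`: test digit o // 4**k % 4, most significant first
def scanB (o : Int) : Nat → String
  | 0 => "Rr"
  | k + 1 =>
    let d := PySem.Int.mod (PySem.Int.floordiv o (4 ^ k)) 4
    if d = 0 then "RR"
    else if d = 3 then "rr"
    else scanB o k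

def spread_alt (generation : Int) (order : Int) : String :=
  let n := generation - 1
  let o := order - 1
  let length := lenPos o
  if n > (length : Int) then "RR" else scanB o n.toNat

-- ===== PRECONDITION & SPEC =====
-- Pre_ restricts to the puzzle's natural 1-indexed domain: order ≥ 1. For order ≤ 0
-- A still returns a value, but the base-4 digits of the then-negative order-1 are an
-- accident of Python floor division, outside the function's purpose.
def Pre_spread (generation : Int) (order : Int) : Prop := 1 ≤ order
instance (generation : Int) (order : Int) : Decidable (Pre_spread generation order) := by unfold Pre_spread; infer_instance
def pvWitness_spread : Int × Int := (2, 3)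

def Spec_spread (generation : Int) (order : Int) (out : String) : Prop := out = spread_alt generation order
instance (generation : Int) (order : Int) (out : String) : Decidable (Spec_spread generation order out) := by unfold Spec_spread; infer_instance

-- ===== CLAIM (what is proved, stated in full; the proofs are below) =====
def Claim_equal_spread : Prop := ∀ (generation : Int) (order : Int), Dom_spread generation order → Pre_spread generation order → Spec_spread generation order (spread generation order)

-- ===== LEMMAS AND PROOFS =====

-- base-4 digits of o, least significant first (proof-side characterisation of loop 1)
def digitsA (o : Int) : Nat → List Int
  | 0 => []
  | n + 1 => PySem.Int.mod o 4 :: digitsA (PySem.Int.floordiv o 4) n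

-- loop 2 read front-to-back on the reversed stack
def scanList : List Int → String
  | [] => "Rr"
  | d :: rest => if d = 0 then "RR" else if d = 3 then "rr" else scanList rest

theorem loop1_eq : ∀ (n : Nat) (g o : Int) (stack : List Int), (g - 1).toNat = n →
    spreadLoop1 g o stack = stack ++ digitsA o n := by
  intro n
  induction n with
  | zero =>
    intro g o stack hg
    rw [spreadLoop1, if_neg (by omega)]
    simp [digitsA]
  | succ m ih =>
    intro g o stack hg
    rw [spreadLoop1, if_pos (by omega)]
    rw [ih (g - 1) _ _ (by omega)]
    simp [digitsA]

theorem loop2_eq : ∀ (l : List Int), spreadLoop2 l = scanList l.reverse := by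
  intro l
  induction l using List.reverseRecOn with
  | nil => rw [spreadLoop2]; rfl
  | append_singleton l a ih =>
    rw [spreadLoop2]
    split
    next hnone => simp at hnone
    next number hlast =>
      rw [List.getLast?_concat] at hlast
      injection hlast with hlast
      subst hlast
      rw [List.dropLast_concat, ih, List.reverse_append]
      simp only [List.reverse_cons, List.reverse_nil, List.nil_append, List.cons_append,
        scanList]

theorem floordiv_floordiv (a b c : Int) (hb : 0 < b) (hc : 0 < c) :
    PySem.Int.floordiv (PySem.Int.floordiv a b) c = PySem.Int.floordiv a (b * c) := by
  have hq := (PySem.Int.floordiv_eq_iff_of_pos (a := PySem.Int.floordiv a b) (q := PySem.Int.floordiv (PySem.Int.floordiv a b) c) hc).mp rfl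
  have h1 := PySem.Int.floordiv_mul_add_mod a b
  have h2 := PySem.Int.mod_nonneg a hb
  have h3 := PySem.Int.mod_lt a hb
  have hbc : (0 : Int) < b * c := by positivity
  have key := (PySem.Int.floordiv_eq_iff_of_pos (a := a) (b := b * c)
      (q := PySem.Int.floordiv (PySem.Int.floordiv a b) c) hbc).mpr ?_
  · exact key.symm
  constructor
  · have hmul := mul_le_mul_of_nonneg_right hq.1 hb.le
    nlinarith
  · have hle : PySem.Int.floordiv a b ≤ (PySem.Int.floordiv (PySem.Int.floordiv a b) c + 1) * c - 1 := by omega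
    have hmul := mul_le_mul_of_nonneg_right hle hb.le
    nlinarith

theorem digitsA_snoc : ∀ (n : Nat) (o : Int),
    digitsA o (n + 1) = digitsA o n ++ [PySem.Int.mod (PySem.Int.floordiv o (4 ^ n)) 4] := by
  intro n
  induction n with
  | zero =>
    intro o
    have h00 : PySem.Int.floordiv o (4 ^ 0) = o := by
      rw [pow_zero, PySem.Int.floordiv_eq_iff_of_pos (by omega)]; omega
    rw [digitsA, digitsA, digitsA, h00]
    rfl
  | succ m ih =>
    intro o
    have hcomp : PySem.Int.floordiv (PySem.Int.floordiv o 4) (4 ^ m) = PySem.Int.floordiv o (4 ^ (m + 1)) := by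
      rw [floordiv_floordiv o 4 (4 ^ m) (by omega) (by positivity), pow_succ']
    calc digitsA o (m + 2)
        = PySem.Int.mod o 4 :: digitsA (PySem.Int.floordiv o 4) (m + 1) := rfl
      _ = PySem.Int.mod o 4 :: (digitsA (PySem.Int.floordiv o 4) m ++ [PySem.Int.mod (PySem.Int.floordiv (PySem.Int.floordiv o 4) (4 ^ m)) 4]) := by rw [ih]
      _ = digitsA o (m + 1) ++ [PySem.Int.mod (PySem.Int.floordiv o (4 ^ (m + 1))) 4] := by
          rw [hcomp]; rfl

theorem scan_eq : ∀ (n : Nat) (o : Int), scanList (digitsA o n).reverse = scanB o n := by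
  intro n
  induction n with
  | zero => intro o; rfl
  | succ m ih =>
    intro o
    rw [digitsA_snoc, List.reverse_append]
    simp only [List.reverse_cons, List.reverse_nil, List.nil_append, List.cons_append,
      scanList, scanB]
    split_ifs <;> simp_all

theorem spread_eq_scanB (g o : Int) : spread g o = scanB (o - 1) (g - 1).toNat := by
  unfold spread
  rw [loop1_eq (g - 1).toNat g (o - 1) [] rfl, List.nil_append, loop2_eq, scan_eq]

theorem lenPos_lt : ∀ (t : Int), 0 ≤ t → t < 4 ^ lenPos t := by
  intro t
  fun_induction lenPos t with
  | case1 t ht ih =>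
    intro _
    have h1 := PySem.Int.floordiv_mul_add_mod t 4
    have h2 := PySem.Int.mod_nonneg t (b := 4) (by omega)
    have h3 := PySem.Int.mod_lt t (b := 4) (by omega)
    have hnn : 0 ≤ PySem.Int.floordiv t 4 := by omega
    have := ih hnn
    rw [pow_succ]
    omega
  | case2 t ht =>
    intro h0
    have : t = 0 := by omega
    simp [this]

theorem scanB_top0 (o : Int) (m : Nat) (h0 : 0 ≤ o) (h : o < 4 ^ m) : scanB o (m + 1) = "RR" := by
  have hfd : PySem.Int.floordiv o (4 ^ m) = 0 := by
    rw [PySem.Int.floordiv_eq_iff_of_pos (by positivity)]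
    constructor <;> omega
  have hm0 : PySem.Int.mod (0 : Int) 4 = 0 := by decide
  simp only [scanB, hfd, hm0]
  norm_num

-- ===== VERDICT (by name: the statement is the Claim_ definition above) =====
theorem spread_spec : Claim_equal_spread := by
  intro g o _ hpre
  unfold Spec_spread
  rw [spread_eq_scanB]
  unfold spread_alt
  simp only []
  have h2 : 0 ≤ o - 1 := by exact sub_nonneg.mpr hpre
  by_cases h3 : g - 1 > (lenPos (o - 1) : Int)
  · rw [if_pos h3]
    obtain ⟨m, hm⟩ : ∃ m, (g - 1).toNat = m + 1 := ⟨(g - 1).toNat - 1, by omega⟩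
    rw [hm]
    have hlen := lenPos_lt (o - 1) h2
    have hle : lenPos (o - 1) ≤ m := by omega
    exact scanB_top0 _ _ h2 (lt_of_lt_of_le hlen (by exact_mod_cast pow_le_pow_right₀ (by omega) hle))
  · rw [if_neg h3]
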